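-- pv_equiv track=rewrite | github.com/GitAcrown/UniversalMod | cogs/capital/capital.py | gen_giftcode
-- ===== SOURCE A (Python) =====
-- def gen_giftcode(nom, n: int = 1):
--     codes = []
--     for i in range(n):
--         if nom.upper() in codes:
--             code = nom.upper() + "-{}".format(i + 1)
--         else:
--             code = nom.upper()
--         codes.append(code)
--     return codes
-- ===== SOURCE B (Python) =====
-- def gen_giftcode(nom, n: int = 1):
--     up = nom.upper()
--     if n < 1:
--         return []
--     return [up] + [up + "-" + str(i) for i in range(2, n + 1)]
-- ===== Notes on version B (the rewrite author's own statement) =====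
-- stated objective: simpler
-- what changed: Replaces the growing-list loop with its per-iteration membership test by a head-plus-tail closed construction: [up] followed by a comprehension over range(2, n+1).
import Mathlib
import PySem

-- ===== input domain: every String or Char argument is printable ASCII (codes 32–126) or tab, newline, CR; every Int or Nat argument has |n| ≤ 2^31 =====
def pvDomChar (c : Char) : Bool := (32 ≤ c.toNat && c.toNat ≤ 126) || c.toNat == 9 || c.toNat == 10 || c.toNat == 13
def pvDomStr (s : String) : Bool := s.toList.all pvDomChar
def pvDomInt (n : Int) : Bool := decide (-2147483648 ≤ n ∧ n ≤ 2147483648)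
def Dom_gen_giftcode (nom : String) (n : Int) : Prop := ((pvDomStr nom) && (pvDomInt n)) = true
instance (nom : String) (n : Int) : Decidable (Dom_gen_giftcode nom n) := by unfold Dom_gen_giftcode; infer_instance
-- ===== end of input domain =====

-- B replaces A's growing-list loop with its per-iteration membership scan by a
-- head-plus-tail construction ([up] followed by one map over range(2, n+1)): simpler.

-- ===== PORT A =====
def gen_giftcode (nom : String) (n : Int) : List String :=
  (PySem.List.pyRange 0 n 1).foldl
    (fun codes i =>
      codes ++ [if codes.contains (PySem.Str.upper nom)
                then PySem.Str.upper nom ++ "-" ++ PySem.Int.toStr (i + 1)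
                else PySem.Str.upper nom])
    []

-- ===== PORT B =====
def gen_giftcode_alt (nom : String) (n : Int) : List String :=
  let up := PySem.Str.upper nom
  if n < 1 then []
  else [up] ++ (PySem.List.pyRange 2 (n + 1) 1).map (fun i => up ++ "-" ++ PySem.Int.toStr i)

-- ===== PRECONDITION & SPEC =====
def Spec_gen_giftcode (nom : String) (n : Int) (out : List String) : Prop := out = gen_giftcode_alt nom n
instance (nom : String) (n : Int) (out : List String) : Decidable (Spec_gen_giftcode nom n out) := by unfold Spec_gen_giftcode; infer_instance

-- ===== CLAIM (what is proved, stated in full; the proofs are below) =====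
def Claim_equal_gen_giftcode : Prop := ∀ (nom : String) (n : Int), Dom_gen_giftcode nom n → Spec_gen_giftcode nom n (gen_giftcode nom n)

-- ===== LEMMAS AND PROOFS =====

-- Once `up` is in the accumulator, every further iteration of A's loop appends the suffixed code.
lemma gen_giftcode_foldl_tail (up : String) (l : List Int) (acc : List String) (h : up ∈ acc) :
    l.foldl
      (fun codes i =>
        codes ++ [if codes.contains up then up ++ "-" ++ PySem.Int.toStr (i + 1) else up])
      acc
    = acc ++ l.map (fun i => up ++ "-" ++ PySem.Int.toStr (i + 1)) := by
  induction l generalizing acc with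
  | nil => simp
  | cons x xs ih =>
    simp only [List.foldl_cons, List.map_cons]
    have hc : acc.contains up = true := by simpa using h
    rw [hc]
    simp only [if_true]
    rw [ih (acc ++ [up ++ "-" ++ PySem.Int.toStr (x + 1)]) (by simp [h])]
    simp

theorem gen_giftcode_eq (nom : String) (n : Int) :
    gen_giftcode nom n = gen_giftcode_alt nom n := by
  unfold gen_giftcode gen_giftcode_alt
  set up := PySem.Str.upper nom with hup
  by_cases hn : n < 1
  · rw [PySem.List.pyRange_one_eq_nil (by omega)]
    simp [hn]
  · rw [if_neg hn]
    rw [PySem.List.pyRange_one_cons (by omega : (0:Int) < n)]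
    rw [List.foldl_cons]
    simp only [List.contains_nil, Bool.false_eq_true, if_false, List.nil_append]
    rw [gen_giftcode_foldl_tail up (PySem.List.pyRange (0+1) n 1) [up] (by simp)]
    have h1 : PySem.List.pyRange (0+1) n 1 = (List.range (n-1).toNat).map (fun k : Nat => (1:Int) + (k:Int)) := by
      rw [PySem.List.pyRange_one]; norm_num
    have h2 : PySem.List.pyRange 2 (n+1) 1 = (List.range (n-1).toNat).map (fun k : Nat => (2:Int) + (k:Int)) := by
      rw [PySem.List.pyRange_one]
      have : (n + 1 - 2).toNat = (n - 1).toNat := by omega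
      rw [this]
    rw [h1, h2, List.map_map, List.map_map]
    congr 1
    apply List.map_congr_left
    intro k _
    simp only [Function.comp_apply]
    have h3 : ((1:Int) + (k:Int)) + 1 = 2 + (k:Int) := by omega
    rw [h3]

-- ===== VERDICT (by name: the statement is the Claim_ definition above) =====
theorem gen_giftcode_spec : Claim_equal_gen_giftcode := by
  intro nom n _
  exact gen_giftcode_eq nom n
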